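-- pv_equiv track=rewrite | github.com/Hal-ws/--Algorithm-Problem-Solving | 12919.py | bfs
-- ===== SOURCE A (Python) =====
-- from collections import deque
--
-- def bfs(word, target):
--     visit = set()
--     visit.add(word)
--     tAcnt = target.count('A')
--     tBcnt = target.count('B')
--     ansL = len(target)
--     q = deque()
--     q.append([word, word.count('A'), word.count('B'), len(word)])
--     while len(q) > 0:
--         w, aCnt, bCnt, l = q[0][0], q[0][1], q[0][2], q[0][3]
--         if w == target:
--             return 1
--         if aCnt > tAcnt and w[l - 1] == 'A' and w[:l - 1] not in visit and l > ansL:#끝의 A를 빼줌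
--             q.append([w[:l - 1], aCnt - 1, bCnt, l - 1])
--         if bCnt > tBcnt and w[0] == 'B':
--             w = w[1:]
--             w = w[::-1]
--             if w not in visit and l > ansL:
--                 q.append([w, aCnt, bCnt - 1, l - 1])
--         q.popleft()
--     return 0
-- ===== SOURCE B (Python) =====
-- def bfs(word, target):
--     # Iterative DFS over the reduction tree with a plain stack of strings:
--     # no deque, no visited set, no A/B-count bookkeeping (the count prunings
--     # in the original never change the result, since the operations only
--     # remove characters).
--     n = len(target)
--     stack = [word]
--     while stack:
--         w = stack.pop()
--         if w == target:
--             return 1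
--         if len(w) > n:
--             if w[-1] == 'A':
--                 stack.append(w[:-1])
--             if w[0] == 'B':
--                 stack.append(w[1:][::-1])
--     return 0
-- ===== Notes on version B (the rewrite author's own statement) =====
-- stated objective: simpler
-- what changed: Replaces the BFS over a deque of [string, A-count, B-count, length] 4-tuples with a visited set and count prunings by a plain depth-first search over a stack of strings alone; the count/visited bookkeeping is dropped entirely since the two operations only remove characters, so the prunings never change the result.
import Mathlib
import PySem

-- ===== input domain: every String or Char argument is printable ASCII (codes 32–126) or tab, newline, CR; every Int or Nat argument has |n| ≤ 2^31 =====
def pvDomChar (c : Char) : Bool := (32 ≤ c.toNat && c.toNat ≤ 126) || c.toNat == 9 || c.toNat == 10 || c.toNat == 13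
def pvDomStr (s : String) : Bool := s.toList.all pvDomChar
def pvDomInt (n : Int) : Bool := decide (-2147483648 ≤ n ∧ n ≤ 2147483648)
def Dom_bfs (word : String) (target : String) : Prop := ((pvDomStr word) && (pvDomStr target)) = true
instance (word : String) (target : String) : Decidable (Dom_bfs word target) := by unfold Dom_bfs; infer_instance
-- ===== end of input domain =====

-- B replaces A's deque-BFS over [string, A-count, B-count, length] tuples (with visited set and
-- count prunings) by a plain stack DFS over strings: simpler, provably the same return value.

-- ===== PORT A =====
-- The BFS while-loop of A. Queue elements are Python's 4-element lists [w, aCnt, bCnt, l];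
-- the deque is a Lean list (front = q[0]), `q.append` is `++ [·]`, `q.popleft` is recursing on
-- the tail.  The temporary `w = w[1:]; w = w[::-1]` of the second branch is written inline
-- (w[1:] is slice w (some 1) none; w[::-1] is List.reverse, PySem.List.slice?_none_none_neg_one).
-- `fuel` only makes the recursion structural (the while-loop itself has no size argument);
-- bfs passes 3 ^ len(word) + 1, which exceeds the number of iterations (proved below).
def bfsLoop (target : List Char) (tA tB ansL : Int) (visit : PySem.Set (List Char)) :
    Nat → List (List Char × Int × Int × Int) → Int
  | _, [] => 0                                    -- while len(q) > 0 fails: return 0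
  | 0, _ :: _ => 0                                -- fuel guard, never reached from bfs
  | fuel+1, (w, a, b, l) :: rest =>
    if w = target then 1
    else
      bfsLoop target tA tB ansL visit fuel
        ((rest ++
          -- if aCnt > tAcnt and w[l-1] == 'A' and w[:l-1] not in visit and l > ansL
          (if a > tA ∧ PySem.List.pyGetD w (l - 1) ' ' = 'A' ∧
              PySem.Set.contains visit (PySem.List.slice w none (some (l - 1))) = false ∧ l > ansL
           then [(PySem.List.slice w none (some (l - 1)), a - 1, b, l - 1)] else [])) ++
         -- if bCnt > tBcnt and w[0] == 'B': ... if w not in visit and l > ansL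
         (if b > tB ∧ PySem.List.pyGetD w 0 ' ' = 'B' then
            (if PySem.Set.contains visit ((PySem.List.slice w (some 1) none).reverse) = false ∧
                l > ansL
             then [((PySem.List.slice w (some 1) none).reverse, a, b - 1, l - 1)] else [])
          else []))

def bfs (word : String) (target : String) : Int :=
  let wl := word.toList
  let tl := target.toList
  let visit := PySem.Set.add PySem.Set.empty wl                 -- visit = set(); visit.add(word)
  let tA : Int := PySem.Chars.count tl ['A']                    -- tAcnt = target.count('A')
  let tB : Int := PySem.Chars.count tl ['B']
  let ansL : Int := tl.length
  bfsLoop tl tA tB ansL visit (3 ^ wl.length + 1)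
    [(wl, (PySem.Chars.count wl ['A'] : Int), (PySem.Chars.count wl ['B'] : Int), (wl.length : Int))]

-- ===== PORT B =====
-- The DFS loop of Source B: a stack of plain strings; head of the Lean list = top of the stack,
-- so `stack.pop()` is matching off the head and the two `append`s push in front
-- (the second-appended child, w[1:][::-1], is popped first, hence listed first).
-- w[:-1] is dropLast (PySem.List.slice_to_neg_one); w[1:] is tail (PySem.List.slice_from_one);
-- w[::-1] is reverse (PySem.List.slice?_none_none_neg_one); w[-1]/w[0] are pyGet.
def dfsLoop (target : List Char) : List (List Char) → Int
  | [] => 0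
  | w :: rest =>
    if w = target then 1
    else if w.length > target.length then
      dfsLoop target
        ((if PySem.List.pyGetD w 0 ' ' = 'B' then [w.tail.reverse] else []) ++
         (if PySem.List.pyGetD w (-1) ' ' = 'A' then [w.dropLast] else []) ++ rest)
    else
      dfsLoop target rest
  termination_by st => (st.map (fun w => 3 ^ w.length)).sum
  decreasing_by
    · have hp : 3 ^ w.length = 3 ^ (w.length - 1) * 3 := by rw [← pow_succ]; congr 1; omega
      have hpos : 0 < 3 ^ (w.length - 1) := by positivity
      split_ifs <;>
        simp only [List.map_append, List.sum_append, List.map_cons, List.sum_cons, List.map_nil,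
          List.sum_nil, List.length_reverse, List.length_tail, List.length_dropLast] <;> omega
    · have hpos : 0 < 3 ^ w.length := by positivity
      simp only [List.map_cons, List.sum_cons]; omega

def bfs_alt (word : String) (target : String) : Int :=
  dfsLoop target.toList [word.toList]

-- ===== PRECONDITION & SPEC =====
def Spec_bfs (word : String) (target : String) (out : Int) : Prop := out = bfs_alt word target
instance (word : String) (target : String) (out : Int) : Decidable (Spec_bfs word target out) := by unfold Spec_bfs; infer_instance

-- ===== CLAIM (what is proved, stated in full; the proofs are below) =====
def Claim_equal_bfs : Prop := ∀ (word : String) (target : String), Dom_bfs word target → Spec_bfs word target (bfs word target)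

-- ===== LEMMAS AND PROOFS =====

-- `reaches t w`: w reduces to t by the two operations (drop a trailing 'A', or drop a
-- leading 'B' and reverse), applied only while strictly longer than t.
-- This is exactly what B's stack loop decides; A's queue loop decides it too.
def reaches (t : List Char) (w : List Char) : Bool :=
  if w = t then true
  else if w.length > t.length then
    (decide (PySem.List.pyGetD w 0 ' ' = 'B') && reaches t w.tail.reverse) ||
    (decide (PySem.List.pyGetD w (-1) ' ' = 'A') && reaches t w.dropLast)
  else false
  termination_by w.length
  decreasing_by
    · simp only [List.length_reverse, List.length_tail]; omega
    · simp only [List.length_dropLast]; omega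

theorem reaches_self (t : List Char) : reaches t t = true := by
  rw [reaches.eq_def]; simp

-- Python's s.count(c) for a single character c is List.count (PySem names no such lemma).
theorem countGo_single (c : Char) (l : List Char) :
    ∀ (fuel acc : Nat), l.length ≤ fuel →
      PySem.Chars.count.go [c] fuel l acc = acc + l.count c := by
  induction l with
  | nil =>
    intro fuel acc _
    cases fuel <;> simp [PySem.Chars.count.go]
  | cons h t ih =>
    intro fuel acc hf
    cases fuel with
    | zero => simp at hf
    | succ n =>
      rw [PySem.Chars.count.go]
      by_cases hc : c = h
      · subst hc
        simp [List.isPrefixOf, ih n (acc + 1) (by simpa using hf)]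
        omega
      · simp [List.isPrefixOf, beq_iff_eq, hc, ih n acc (by simpa using hf), Ne.symm hc]

theorem count_single (w : List Char) (c : Char) :
    PySem.Chars.count w [c] = w.count c := by
  rw [PySem.Chars.count]
  simp [countGo_single c w w.length 0 le_rfl]

-- B's loop answers "does some stack element reach t".
theorem dfsLoop_eq (t : List Char) (st : List (List Char)) :
    dfsLoop t st = if st.any (reaches t) then 1 else 0 := by
  induction st using dfsLoop.induct t with
  | case1 => simp [dfsLoop]
  | case2 =>
    rw [dfsLoop]
    simp [reaches_self]
  | case3 =>
    rename_i w rest h1 h2 ih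
    simp only [dite_eq_ite] at ih
    rw [dfsLoop, if_neg h1, if_pos h2, ih]
    rw [List.any_cons, reaches.eq_def, if_neg h1, if_pos h2]
    split_ifs <;> simp_all
    all_goals
      obtain ⟨x, hx, hxt⟩ : ∃ x ∈ rest, reaches t x = true := by assumption
      have hall : ∀ x ∈ rest, reaches t x = false := by tauto
      exact absurd hxt (by simp [hall x hx])
  | case4 =>
    rename_i w rest h1 h2 ih
    rw [dfsLoop, if_neg h1, if_neg h2, ih]
    rw [List.any_cons, reaches.eq_def, if_neg h1, if_neg h2]
    simp

-- The two operations only remove one 'A' (resp. one 'B'): anything that reaches t has at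
-- least t's counts of both letters.  This is why A's count prunings never change the answer.
theorem reaches_counts (t : List Char) : ∀ w, reaches t w = true →
    t.count 'A' ≤ w.count 'A' ∧ t.count 'B' ≤ w.count 'B' := by
  intro w
  induction w using reaches.induct t with
  | case1 => intro _; exact ⟨le_rfl, le_rfl⟩
  | case2 =>
    rename_i w h1 h2 ih1 ih2
    intro h
    rw [reaches.eq_def, if_neg h1, if_pos h2] at h
    have hne : w ≠ [] := by intro he; subst he; simp at h2
    simp only [Bool.or_eq_true, Bool.and_eq_true, decide_eq_true_eq] at h
    obtain ⟨wh, wt, rfl⟩ := List.exists_cons_of_ne_nil hne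
    rcases h with ⟨hB, hr⟩ | ⟨hA, hr⟩
    · simp only [PySem.List.pyGetD_zero_cons] at hB
      subst hB
      have := ih1 hr
      simp only [List.tail_cons, List.count_reverse] at this
      constructor <;> simp <;> omega
    · rw [PySem.List.pyGetD_neg_one _ ' ' hne] at hA
      have := ih2 hr
      have hsplit : wh :: wt = (wh :: wt).dropLast ++ [(wh :: wt).getLast hne] :=
        (List.dropLast_append_getLast hne).symm
      rw [hA] at hsplit
      constructor <;> (rw [hsplit]; simp [List.count_append]) <;> omega
  | case3 =>
    rename_i w h1 h2
    intro h
    rw [reaches.eq_def, if_neg h1, if_neg h2] at h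
    simp at h

-- One unfolding of `reaches`, with the (sound) count prunings of A added to the conditions.
theorem reaches_step (t w : List Char) (hwt : w ≠ t) :
    reaches t w =
      ((decide (t.count 'B' < w.count 'B' ∧ PySem.List.pyGetD w 0 ' ' = 'B' ∧
          t.length < w.length) && reaches t w.tail.reverse) ||
       (decide (t.count 'A' < w.count 'A' ∧ PySem.List.pyGetD w (-1) ' ' = 'A' ∧
          t.length < w.length) && reaches t w.dropLast)) := by
  rw [reaches.eq_def, if_neg hwt]
  by_cases hlen : w.length > t.length
  · rw [if_pos hlen]
    have hne : w ≠ [] := List.ne_nil_of_length_pos (by omega)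
    rw [Bool.eq_iff_iff]
    simp only [Bool.or_eq_true, Bool.and_eq_true, decide_eq_true_eq]
    constructor
    · rintro (⟨hB, hr⟩ | ⟨hA, hr⟩)
      · left
        refine ⟨⟨?_, hB, hlen⟩, hr⟩
        obtain ⟨wh, wt, rfl⟩ := List.exists_cons_of_ne_nil hne
        simp only [PySem.List.pyGetD_zero_cons] at hB
        subst hB
        have := (reaches_counts t _ hr).2
        simp only [List.tail_cons, List.count_reverse] at this
        simp; omega
      · right
        refine ⟨⟨?_, hA, hlen⟩, hr⟩
        rw [PySem.List.pyGetD_neg_one _ ' ' hne] at hA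
        have := (reaches_counts t _ hr).1
        have hsplit : w = w.dropLast ++ [w.getLast hne] :=
          (List.dropLast_append_getLast hne).symm
        rw [hA] at hsplit
        rw [hsplit]; simp [List.count_append]; omega
    · rintro (⟨⟨_, hB, _⟩, hr⟩ | ⟨⟨_, hA, _⟩, hr⟩)
      · exact Or.inl ⟨hB, hr⟩
      · exact Or.inr ⟨hA, hr⟩
  · rw [if_neg hlen]
    rw [Bool.eq_iff_iff]
    simp only [Bool.or_eq_true, Bool.and_eq_true, decide_eq_true_eq]
    constructor
    · intro h; simp at h
    · rintro (⟨⟨_, _, h⟩, _⟩ | ⟨⟨_, _, h⟩, _⟩) <;> omega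

theorem ite_ite_nil {α : Type} (P Q : Prop) [Decidable P] [Decidable Q] (x : α) :
    (if P then (if Q then [x] else []) else []) = if P ∧ Q then [x] else [] := by
  split_ifs <;> first | rfl | tauto

-- A's loop answers the same question, given the bookkeeping invariant of the queue:
-- each element [w, a, b, l] carries a = w.count('A'), b = w.count('B'), l = len(w), and
-- every visited string is at least as long as every queued one (so the `not in visit`
-- tests always pass: enqueued strings are strictly shorter).  `fuel` bounds the sum of
-- 3^len over the queue, which every iteration strictly decreases.
theorem bfsLoop_eq (t : List Char) (visit : PySem.Set (List Char)) :
    ∀ (fuel : Nat) (q : List (List Char × Int × Int × Int)),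
    (∀ s ∈ q, s.2.1 = (s.1.count 'A' : Int) ∧ s.2.2.1 = (s.1.count 'B' : Int) ∧
        s.2.2.2 = (s.1.length : Int) ∧ ∀ u ∈ visit, s.1.length ≤ u.length) →
    ((q.map (fun s => 3 ^ s.1.length)).sum < fuel) →
    bfsLoop t ((t.count 'A' : Int)) ((t.count 'B' : Int)) ((t.length : Int)) visit fuel q =
      if q.any (fun s => reaches t s.1) then 1 else 0 := by
  intro fuel
  induction fuel with
  | zero => intro q hq hfuel; exact absurd hfuel (Nat.not_lt_zero _)
  | succ fuel ih =>
    intro q hq hfuel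
    match q with
    | [] => simp [bfsLoop]
    | (w, a, b, l) :: rest =>
      obtain ⟨ha, hb, hl, hvis⟩ := hq _ List.mem_cons_self
      replace ha : a = ((w.count 'A' : Nat) : Int) := ha
      replace hb : b = ((w.count 'B' : Nat) : Int) := hb
      replace hl : l = ((w.length : Nat) : Int) := hl
      replace hvis : ∀ u ∈ visit, w.length ≤ u.length := hvis
      have hqrest := fun s hs => hq s (List.mem_cons_of_mem _ hs)
      rw [bfsLoop]
      by_cases hwt : w = t
      · subst hwt; rw [if_pos rfl]; simp [reaches_self]
      · rw [if_neg hwt]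
        by_cases hne : w = []
        · subst hne
          have ha0 : a = 0 := by simpa using ha
          have hb0 : b = 0 := by simpa using hb
          have hnc1 : ¬(a > ((t.count 'A' : Nat) : Int) ∧
              PySem.List.pyGetD [] (l - 1) ' ' = 'A' ∧
              PySem.Set.contains visit (PySem.List.slice [] none (some (l - 1))) = false ∧
              l > ((t.length : Nat) : Int)) := by
            rintro ⟨h1, -⟩; rw [ha0] at h1; omega
          have hnc2 : ¬(b > ((t.count 'B' : Nat) : Int) ∧
              PySem.List.pyGetD [] 0 ' ' = 'B') := by
            rintro ⟨h1, -⟩; rw [hb0] at h1; omega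
          rw [if_neg hnc1, if_neg hnc2]
          simp only [List.append_nil]
          rw [ih rest hqrest (by simp at hfuel ⊢; omega)]
          have hr0 : reaches t [] = false := by
            rw [reaches.eq_def, if_neg hwt]
            simp
          have hany0 : ((([], a, b, l) :: rest).any fun s => reaches t s.1) =
              (reaches t [] || rest.any fun s => reaches t s.1) := rfl
          simp only [hany0, hr0, Bool.false_or]
        · -- w ≠ []: normalize the tests to pyGetD w (-1) / pyGetD w 0 and drop the
          -- always-passing visit tests (queued strings are strictly shorter than `word`)
          have hLpos : 0 < w.length := List.length_pos_iff.mpr hne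
          have hcast : (w.length : Int) - 1 = ((w.length - 1 : Nat) : Int) := by omega
          have hgl : PySem.List.pyGetD w (l - 1) ' ' = PySem.List.pyGetD w (-1) ' ' := by
            rw [hl, hcast, PySem.List.pyGetD_natCast, PySem.List.pyGetD_neg_one _ ' ' hne]
            rw [List.getLast_eq_getElem, List.getD_eq_getElem _ _ (by omega)]
          have hslice : PySem.List.slice w none (some (l - 1)) = w.dropLast := by
            rw [hl, hcast, PySem.List.slice_to_natCast, List.dropLast_eq_take]
          have hnotin : ∀ x : List Char, x.length < w.length →
              PySem.Set.contains visit x = false := by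
            intro x hx
            have hxmem : x ∉ visit := fun hmem => by have := hvis _ hmem; omega
            simpa [PySem.Set.contains] using hxmem
          have hcont1 : PySem.Set.contains visit w.dropLast = false :=
            hnotin _ (by simp only [List.length_dropLast]; omega)
          have hcont2 : PySem.Set.contains visit w.tail.reverse = false :=
            hnotin _ (by simp only [List.length_reverse, List.length_tail]; omega)
          rw [hgl, hslice, PySem.List.slice_from_one, hcont1,
            ite_ite_nil (b > ((t.count 'B' : Nat) : Int) ∧ PySem.List.pyGetD w 0 ' ' = 'B') _ _,
            hcont2]
          rw [if_congr (show (a > ((t.count 'A' : Nat) : Int) ∧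
                PySem.List.pyGetD w (-1) ' ' = 'A' ∧ (false = false) ∧
                l > ((t.length : Nat) : Int)) ↔
              (t.count 'A' < w.count 'A' ∧ PySem.List.pyGetD w (-1) ' ' = 'A' ∧
                t.length < w.length) from by
            rw [ha, hl]
            constructor
            · rintro ⟨x1, x2, -, x3⟩; exact ⟨by omega, x2, by omega⟩
            · rintro ⟨x1, x2, x3⟩; exact ⟨by omega, x2, rfl, by omega⟩) rfl rfl]
          rw [if_congr (show ((b > ((t.count 'B' : Nat) : Int) ∧
                PySem.List.pyGetD w 0 ' ' = 'B') ∧ ((false = false) ∧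
                l > ((t.length : Nat) : Int))) ↔
              (t.count 'B' < w.count 'B' ∧ PySem.List.pyGetD w 0 ' ' = 'B' ∧
                t.length < w.length) from by
            rw [hb, hl]
            constructor
            · rintro ⟨⟨x1, x2⟩, -, x3⟩; exact ⟨by omega, x2, by omega⟩
            · rintro ⟨x1, x2, x3⟩; exact ⟨⟨by omega, x2⟩, rfl, by omega⟩) rfl rfl]
          -- how each operation changes the two letter counts
          have hsplitA : ∀ (_ : PySem.List.pyGetD w (-1) ' ' = 'A'),
              w = w.dropLast ++ ['A'] := by
            intro hA
            rw [PySem.List.pyGetD_neg_one _ ' ' hne] at hA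
            conv_lhs => rw [← List.dropLast_append_getLast hne]
            rw [hA]
          have hsplitB : ∀ (_ : PySem.List.pyGetD w 0 ' ' = 'B'),
              w = 'B' :: w.tail := by
            intro hB
            obtain ⟨wh, wt, rfl⟩ := List.exists_cons_of_ne_nil hne
            simp only [PySem.List.pyGetD_zero_cons] at hB
            simp only [List.tail_cons]
            rw [hB]
          have hstep := reaches_step t w hwt
          have hpow : 3 ^ (w.length - 1) + 3 ^ (w.length - 1) + 1 ≤ 3 ^ w.length := by
            have h3 : 3 ^ w.length = 3 ^ (w.length - 1) * 3 := by
              rw [← pow_succ]; congr 1; omega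
            have : 0 < 3 ^ (w.length - 1) := by positivity
            omega
          have hpos1 : 0 < 3 ^ (w.length - 1) := by positivity
          have hpos0 : 0 < 3 ^ w.length := by positivity
          simp only [List.map_cons, List.sum_cons] at hfuel
          have hany : ((((w, a, b, l)) :: rest).any fun s => reaches t s.1) =
              (reaches t w || rest.any fun s => reaches t s.1) := rfl
          by_cases hp1 : (t.count 'A' < w.count 'A' ∧ PySem.List.pyGetD w (-1) ' ' = 'A' ∧
              t.length < w.length) <;>
            by_cases hp2 : (t.count 'B' < w.count 'B' ∧ PySem.List.pyGetD w 0 ' ' = 'B' ∧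
              t.length < w.length)
          · -- both children enqueued
            rw [if_pos hp1, if_pos hp2]
            obtain ⟨hcA, hA, hlt⟩ := hp1
            obtain ⟨hcB, hB, -⟩ := hp2
            have hcA1 : w.count 'A' = w.dropLast.count 'A' + 1 := by
              conv_lhs => rw [hsplitA hA]
              simp [List.count_append]
            have hcB1 : w.count 'B' = w.dropLast.count 'B' := by
              conv_lhs => rw [hsplitA hA]
              simp [List.count_append]
            have hcA2 : w.count 'A' = w.tail.count 'A' := by
              conv_lhs => rw [hsplitB hB]
              simp
            have hcB2 : w.count 'B' = w.tail.count 'B' + 1 := by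
              conv_lhs => rw [hsplitB hB]
              simp
            rw [ih _ ?hq ?hf]
            case hq =>
              intro s hs
              simp only [List.mem_append, List.mem_singleton] at hs
              rcases hs with (hs | rfl) | rfl
              · exact hqrest s hs
              · exact ⟨by simp only; omega, by simp only; omega,
                  by simp only [List.length_dropLast]; omega,
                  fun u hu => by have := hvis u hu; simp only [List.length_dropLast]; omega⟩
              · exact ⟨by simp only [List.count_reverse]; omega,
                  by simp only [List.count_reverse]; omega,
                  by simp only [List.length_reverse, List.length_tail]; omega,
                  fun u hu => by have := hvis u hu
                                 simp only [List.length_reverse, List.length_tail]; omega⟩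
            case hf =>
              simp only [List.map_append, List.sum_append, List.map_cons, List.sum_cons,
                List.map_nil, List.sum_nil, List.length_dropLast, List.length_reverse,
                List.length_tail]
              omega
            have e1 : decide (t.count 'A' < w.count 'A' ∧ PySem.List.pyGetD w (-1) ' ' = 'A' ∧
                t.length < w.length) = true := decide_eq_true ⟨hcA, hA, hlt⟩
            have e2 : decide (t.count 'B' < w.count 'B' ∧ PySem.List.pyGetD w 0 ' ' = 'B' ∧
                t.length < w.length) = true := decide_eq_true ⟨hcB, hB, hlt⟩
            have hany2 : (((rest ++ [(w.dropLast, a - 1, b, l - 1)]) ++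
                [(w.tail.reverse, a, b - 1, l - 1)]).any fun s => reaches t s.1) =
                ((rest.any fun s => reaches t s.1) || (reaches t w.dropLast ||
                  reaches t w.tail.reverse)) := by
              simp [List.any_append]
            simp only [hany2, hany, hstep, e1, e2, Bool.true_and]
            cases reaches t w.dropLast <;> cases reaches t w.tail.reverse <;>
              cases (rest.any fun s => reaches t s.1) <;> simp
          · -- only the A-child
            rw [if_pos hp1, if_neg hp2]
            obtain ⟨hcA, hA, hlt⟩ := hp1
            have hcA1 : w.count 'A' = w.dropLast.count 'A' + 1 := by
              conv_lhs => rw [hsplitA hA]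
              simp [List.count_append]
            have hcB1 : w.count 'B' = w.dropLast.count 'B' := by
              conv_lhs => rw [hsplitA hA]
              simp [List.count_append]
            rw [ih _ ?hq2 ?hf2]
            case hq2 =>
              intro s hs
              simp only [List.append_nil, List.mem_append, List.mem_singleton] at hs
              rcases hs with hs | rfl
              · exact hqrest s hs
              · exact ⟨by simp only; omega, by simp only; omega,
                  by simp only [List.length_dropLast]; omega,
                  fun u hu => by have := hvis u hu; simp only [List.length_dropLast]; omega⟩
            case hf2 =>
              simp only [List.append_nil, List.map_append, List.sum_append, List.map_cons,
                List.sum_cons, List.map_nil, List.sum_nil, List.length_dropLast]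
              omega
            have e1 : decide (t.count 'A' < w.count 'A' ∧ PySem.List.pyGetD w (-1) ' ' = 'A' ∧
                t.length < w.length) = true := decide_eq_true ⟨hcA, hA, hlt⟩
            have e2 : decide (t.count 'B' < w.count 'B' ∧ PySem.List.pyGetD w 0 ' ' = 'B' ∧
                t.length < w.length) = false := decide_eq_false hp2
            have hany2 : (((rest ++ [(w.dropLast, a - 1, b, l - 1)]) ++ []).any
                fun s => reaches t s.1) =
                ((rest.any fun s => reaches t s.1) || reaches t w.dropLast) := by
              simp [List.any_append]
            simp only [hany2, hany, hstep, e1, e2, Bool.true_and, Bool.false_and,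
              Bool.false_or]
            cases reaches t w.dropLast <;> cases (rest.any fun s => reaches t s.1) <;> simp
          · -- only the B-child
            rw [if_neg hp1, if_pos hp2]
            obtain ⟨hcB, hB, hlt⟩ := hp2
            have hcA2 : w.count 'A' = w.tail.count 'A' := by
              conv_lhs => rw [hsplitB hB]
              simp
            have hcB2 : w.count 'B' = w.tail.count 'B' + 1 := by
              conv_lhs => rw [hsplitB hB]
              simp
            rw [ih _ ?hq3 ?hf3]
            case hq3 =>
              intro s hs
              simp only [List.append_nil, List.mem_append, List.mem_singleton] at hs
              rcases hs with hs | rfl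
              · exact hqrest s hs
              · exact ⟨by simp only [List.count_reverse]; omega,
                  by simp only [List.count_reverse]; omega,
                  by simp only [List.length_reverse, List.length_tail]; omega,
                  fun u hu => by have := hvis u hu
                                 simp only [List.length_reverse, List.length_tail]; omega⟩
            case hf3 =>
              simp only [List.append_nil, List.map_append, List.sum_append, List.map_cons,
                List.sum_cons, List.map_nil, List.sum_nil, List.length_reverse,
                List.length_tail]
              omega
            have e1 : decide (t.count 'A' < w.count 'A' ∧ PySem.List.pyGetD w (-1) ' ' = 'A' ∧
                t.length < w.length) = false := decide_eq_false hp1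
            have e2 : decide (t.count 'B' < w.count 'B' ∧ PySem.List.pyGetD w 0 ' ' = 'B' ∧
                t.length < w.length) = true := decide_eq_true ⟨hcB, hB, hlt⟩
            have hany2 : (((rest ++ []) ++ [(w.tail.reverse, a, b - 1, l - 1)]).any
                fun s => reaches t s.1) =
                ((rest.any fun s => reaches t s.1) || reaches t w.tail.reverse) := by
              simp [List.any_append]
            simp only [hany2, hany, hstep, e1, e2, Bool.true_and, Bool.false_and]
            cases reaches t w.tail.reverse <;> cases (rest.any fun s => reaches t s.1) <;> simp
          · -- no child enqueued
            rw [if_neg hp1, if_neg hp2]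
            simp only [List.append_nil]
            rw [ih rest hqrest (by omega)]
            have e1 : decide (t.count 'A' < w.count 'A' ∧ PySem.List.pyGetD w (-1) ' ' = 'A' ∧
                t.length < w.length) = false := decide_eq_false hp1
            have e2 : decide (t.count 'B' < w.count 'B' ∧ PySem.List.pyGetD w 0 ' ' = 'B' ∧
                t.length < w.length) = false := decide_eq_false hp2
            simp only [hany, hstep, e1, e2, Bool.false_and, Bool.or_false, Bool.false_or]

-- ===== VERDICT (by name: the statement is the Claim_ definition above) =====
theorem bfs_spec : Claim_equal_bfs := by
  intro word target _
  unfold Spec_bfs bfs bfs_alt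
  simp only [count_single]
  rw [dfsLoop_eq, bfsLoop_eq target.toList _ _ _ ?hq ?hf]
  case hq =>
    intro s hs
    simp only [List.mem_singleton] at hs
    subst hs
    exact ⟨rfl, rfl, rfl, fun u hu => by
      have : u = word.toList := by simpa [PySem.Set.add, PySem.Set.empty] using hu
      rw [this]⟩
  case hf =>
    simp
  rfl
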